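-- pv_equiv track=rewrite | github.com/corinthionia/algorithm-study | python/programmers/implementation/77885.py | solution
-- ===== SOURCE A (Python) =====
-- def solution(numbers):
--     answer = []
--
--     for number in numbers:
--         # 0이 없는 경우 대비하기 위해 맨 앞에 0 추가
--         B = list('0' + format(number, 'b'))
--
--         # 가장 마지막 0을 찾아서 1로 바꾸기
--         idx = ''.join(B).rfind('0')
--         B[idx] = '1'
--
--         # 홀수인 경우 바로 다음 인덱스의 값을 0으로 변경해야 함
--         if number % 2 == 1:
--             B[idx+1] = '0'
--
--         answer.append(int(''.join(B), 2))
--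
--     return answer
-- ===== SOURCE B (Python) =====
-- def solution(numbers):
--     def bit_next(n):
--         z = ~n & (n + 1)          # lowest zero bit of n
--         return n + z - (z >> 1)   # set it; for odd n this also clears the 1 just below
--     return [bit_next(n) for n in numbers]
-- ===== Notes on version B (the rewrite author's own statement) =====
-- stated objective: faster
-- what changed: Replaces per-number binary-string formatting, rfind scan over the characters and int(...,2) reparse with pure two's-complement bit arithmetic (z = ~n & (n+1); answer n + z - (z >> 1)), and restricts to the problem's natural nonnegative domain.
-- outside the precondition, e.g. on solution([-3]): A returns [11], B returns [-2]; on solution([-2]): A raises ValueError, B returns [-1]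
import Mathlib
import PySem

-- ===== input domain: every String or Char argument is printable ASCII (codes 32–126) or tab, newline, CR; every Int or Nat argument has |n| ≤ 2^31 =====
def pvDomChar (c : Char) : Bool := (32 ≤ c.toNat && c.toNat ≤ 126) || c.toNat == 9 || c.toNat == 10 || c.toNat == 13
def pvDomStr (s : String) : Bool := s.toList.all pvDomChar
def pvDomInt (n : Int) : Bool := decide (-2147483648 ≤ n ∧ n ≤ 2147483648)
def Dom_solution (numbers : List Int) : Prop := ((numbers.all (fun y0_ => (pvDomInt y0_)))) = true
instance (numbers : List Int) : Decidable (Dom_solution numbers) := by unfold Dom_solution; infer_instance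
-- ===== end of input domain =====

-- ===== PORT A =====
-- B replaces A's per-number binary-string formatting, rfind scan and int(...,2) reparse
-- by pure two's-complement bit arithmetic (objective: faster, constant-factor).

-- int(''.join(B), 2): under Pre_ (number >= 0) the argument is always a nonempty string of
-- '0'/'1' digits, on which int(s, 2) is exactly this base-2 digit fold.  (PySem.Int.ofCharsBase?
-- models the general parser, but its digit-fold internals are private to PySemCore, so the
-- guaranteed-digits case is ported by hand; outside Pre_ Python raises ValueError here.)
def parseBin2 (cs : List Char) : Int :=
  cs.foldl (fun a c => 2 * a + (if c == '1' then 1 else 0)) 0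

-- the body of A's for-loop, for one `number`
def aStep (number : Int) : Int :=
  let B0 := '0' :: PySem.Int.toBinChars number              -- B = list('0' + format(number, 'b'))
  let idx := PySem.Chars.rfind B0 ['0']                     -- idx = ''.join(B).rfind('0')
  let B1 := PySem.List.pySetD B0 idx '1'                    -- B[idx] = '1'   (idx always in range: '0' ∈ B0)
  let B2 := if PySem.Int.mod number 2 == 1
            then PySem.List.pySetD B1 (idx + 1) '0' else B1 -- B[idx+1] = '0' (in range whenever executed)
  parseBin2 B2                                              -- int(''.join(B), 2)

def solution (numbers : List Int) : List Int :=
  numbers.foldl (fun answer number => answer ++ [aStep number]) []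

-- ===== PORT B =====
def bitNext (n : Int) : Int :=
  let z := PySem.Int.band (Int.not n) (n + 1)   -- z = ~n & (n + 1)
  n + z - (z >>> (1 : Nat))                     -- n + z - (z >> 1)

def solution_alt (numbers : List Int) : List Int :=
  numbers.map bitNext

-- ===== PRECONDITION & SPEC =====
-- Pre_ restricts to nonnegative numbers, the problem's natural domain: on negative even inputs
-- A raises ValueError (int(...,2) sees the '-' of format(number,'b')), and on negative odd
-- inputs A's returned value is an accident of string-editing that '-' sign.
def Pre_solution (numbers : List Int) : Prop := ∀ x ∈ numbers, 0 ≤ x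
instance (numbers : List Int) : Decidable (Pre_solution numbers) := by unfold Pre_solution; infer_instance

def pvWitness_solution : List Int := [0, 1, 2, 3, 6, 7, 12]

def Spec_solution (numbers : List Int) (out : List Int) : Prop := out = solution_alt numbers
instance (numbers : List Int) (out : List Int) : Decidable (Spec_solution numbers out) := by unfold Spec_solution; infer_instance

-- ===== CLAIM (what is proved, stated in full; the proofs are below) =====
def Claim_equal_solution : Prop := ∀ (numbers : List Int), Dom_solution numbers → Pre_solution numbers → Spec_solution numbers (solution numbers)

-- ===== LEMMAS AND PROOFS =====

-- the common specification both per-element computations meet on Nat: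
-- gnext n = n+1 for even n, and for odd n the recursive bit-carry step

def gnext (n : Nat) : Nat :=
  if h : n % 2 = 0 then n + 1
  else 2 * gnext (n / 2) + (n / 2) % 2
decreasing_by exact Nat.div_lt_self (by omega) (by omega)

def zN (m : Nat) : Nat := (m + 1) - ((m + 1) &&& m)

lemma land_succ_even (c : Nat) : (2 * c + 1) &&& (2 * c) = 2 * c := by
  apply Nat.eq_of_testBit_eq
  intro i
  cases i with
  | zero =>
    simp only [Nat.testBit_zero]
    have h2 : (2 * c) % 2 = 0 := by omega
    simp [h2]
  | succ j =>
    rw [Nat.testBit_and]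
    simp only [Nat.testBit_add_one]
    have h1 : (2 * c + 1) / 2 = c := by omega
    have h2 : (2 * c) / 2 = c := by omega
    simp [h1, h2]

lemma land_even_odd (a b : Nat) : (2 * a) &&& (2 * b + 1) = 2 * (a &&& b) := by
  apply Nat.eq_of_testBit_eq
  intro i
  cases i with
  | zero =>
    simp only [Nat.testBit_zero]
    have h1 : (2 * a) % 2 = 0 := by omega
    have h2 : (2 * (a &&& b)) % 2 = 0 := by omega
    simp [h1, h2]
  | succ j =>
    rw [Nat.testBit_and]
    simp only [Nat.testBit_add_one]
    have h1 : (2 * a) / 2 = a := by omega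
    have h2 : (2 * b + 1) / 2 = b := by omega
    have h3 : (2 * (a &&& b)) / 2 = a &&& b := by omega
    simp [h1, h2, h3, Nat.testBit_and]

lemma zN_even {m : Nat} (h : m % 2 = 0) : zN m = 1 := by
  obtain ⟨c, rfl⟩ : ∃ c, m = 2 * c := ⟨m / 2, by omega⟩
  unfold zN
  rw [land_succ_even]
  omega

lemma zN_odd {m : Nat} (h : m % 2 = 1) : zN m = 2 * zN (m / 2) := by
  obtain ⟨k, rfl⟩ : ∃ k, m = 2 * k + 1 := ⟨m / 2, by omega⟩
  have hk : (2 * k + 1) / 2 = k := by omega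
  unfold zN
  rw [hk]
  have h1 : 2 * k + 1 + 1 = 2 * (k + 1) := by omega
  rw [h1, land_even_odd]
  have h2 : (k + 1) &&& k ≤ k + 1 := Nat.and_le_left
  omega

lemma zN_pos (m : Nat) : 1 ≤ zN m := by
  induction m using Nat.strong_induction_on with
  | _ m ih =>
    by_cases h : m % 2 = 0
    · rw [zN_even h]
    · have h1 : m % 2 = 1 := by omega
      rw [zN_odd h1]
      have := ih (m / 2) (by omega)
      omega

lemma band_not_eq_zN (m : Nat) :
    PySem.Int.band (Int.not (m : Int)) ((m : Int) + 1) = (zN m : Int) := by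
  have hnot : Int.not (m : Int) = -(m : Int) - 1 := by
    cases m
    · simp [Int.not]
    · simp only [Int.not, Int.negSucc_eq]
      push_cast
      ring
  rw [hnot]
  unfold PySem.Int.band
  rw [if_neg (by omega), if_pos (by omega)]
  have hb : ((m : Int) + 1).toNat = m + 1 := by omega
  have ha : (-(-(m : Int) - 1) - 1).toNat = m := by omega
  rw [hb, ha]
  rfl

lemma gnext_eq (m : Nat) : m + zN m - zN m / 2 = gnext m := by
  induction m using Nat.strong_induction_on with
  | _ m ih =>
    by_cases h : m % 2 = 0
    · rw [zN_even h, gnext, dif_pos h]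
      omega
    · have h1 : m % 2 = 1 := by omega
      have ihh := ih (m / 2) (by omega)
      rw [zN_odd h1, gnext, dif_neg h]
      by_cases h2 : m / 2 % 2 = 0
      · rw [zN_even h2] at ihh ⊢
        omega
      · have h3 : m / 2 % 2 = 1 := by omega
        rw [zN_odd h3] at ihh ⊢
        have hp := zN_pos (m / 2 / 2)
        omega

lemma bitNext_eq_gnext (m : Nat) : bitNext (m : Int) = (gnext m : Int) := by
  simp only [bitNext]
  rw [band_not_eq_zN, ← Int.natCast_shiftRight]
  have h2 : zN m >>> 1 = zN m / 2 := by
    simp [Nat.shiftRight_eq_div_pow]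
  rw [h2, ← gnext_eq m]
  have := Nat.div_le_self (zN m) 2
  omega

lemma gnext_even {m : Nat} (h : m % 2 = 0) : gnext m = m + 1 := by
  rw [gnext, dif_pos h]

lemma gnext_odd {m : Nat} (h : m % 2 = 1) : gnext m = 2 * gnext (m / 2) + (m / 2) % 2 := by
  rw [gnext, dif_neg (by omega)]

def binPos (n : Nat) : List Char :=
  if _h : n < 2 then ['1'] else binPos (n / 2) ++ [(n % 2).digitChar]
decreasing_by exact Nat.div_lt_self (by omega) (by omega)

lemma toDigitsCore_eq (fuel n : Nat) (ds : List Char) (h0 : 0 < n) (hf : n ≤ fuel) :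
    Nat.toDigitsCore 2 fuel n ds = binPos n ++ ds := by
  induction fuel generalizing n ds with
  | zero => omega
  | succ f ihf =>
    rw [Nat.toDigitsCore]
    by_cases h : n / 2 = 0
    · have hn1 : n = 1 := by omega
      subst hn1
      norm_num
      rw [binPos]
      norm_num
      decide
    · simp only [h]
      rw [ihf (n / 2) _ (by omega) (by omega)]
      conv_rhs => rw [binPos]
      rw [dif_neg (by omega)]
      simp

lemma toBinChars_eq (m : Nat) (h : 1 ≤ m) : PySem.Int.toBinChars (m : Int) = binPos m := by
  unfold PySem.Int.toBinChars
  rw [if_neg (by omega)]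
  have : (m : Int).toNat = m := by omega
  rw [this]
  unfold Nat.toDigits
  rw [toDigitsCore_eq (m + 1) m [] (by omega) (by omega)]
  simp

lemma binPos_even (c : Nat) (h : 1 ≤ c) : binPos (2 * c) = binPos c ++ ['0'] := by
  conv_lhs => rw [binPos]
  rw [dif_neg (by omega)]
  have h1 : 2 * c / 2 = c := by omega
  have h2 : 2 * c % 2 = 0 := by omega
  rw [h1, h2]
  rfl

lemma binPos_odd (c : Nat) (h : 1 ≤ c) : binPos (2 * c + 1) = binPos c ++ ['1'] := by
  conv_lhs => rw [binPos]
  rw [dif_neg (by omega)]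
  have h1 : (2 * c + 1) / 2 = c := by omega
  have h2 : (2 * c + 1) % 2 = 1 := by omega
  rw [h1, h2]
  rfl

lemma binPos_odd_last (c : Nat) (h : c % 2 = 1) : ∃ front, binPos c = front ++ ['1'] := by
  by_cases h1 : c = 1
  · subst h1
    exact ⟨[], by rw [binPos]; simp⟩
  · obtain ⟨k, rfl⟩ : ∃ k, c = 2 * k + 1 := ⟨c / 2, by omega⟩
    exact ⟨binPos k, binPos_odd k (by omega)⟩

lemma go_le (s : List Char) (j : Nat) : PySem.Chars.rfind.go s ['0'] j ≤ (j : Int) := by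
  induction j with
  | zero => rw [PySem.Chars.rfind.go]; split <;> simp
  | succ j ih =>
    rw [PySem.Chars.rfind.go]
    split
    · simp
    · push_cast
      omega

lemma go_nonneg (s : List Char) (j : Nat) (h : List.isPrefixOf ['0'] s = true) :
    0 ≤ PySem.Chars.rfind.go s ['0'] j := by
  induction j with
  | zero => rw [PySem.Chars.rfind.go, if_pos h]
  | succ j ih =>
    rw [PySem.Chars.rfind.go]
    split
    · positivity
    · exact ih

lemma isPrefixOf_zero_append {ys : List Char} {c : Char} (hc : c ≠ '0') :
    List.isPrefixOf ['0'] (ys ++ [c]) = List.isPrefixOf ['0'] ys := by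
  cases ys with
  | nil => simp [List.isPrefixOf, Ne.symm hc]
  | cons y t => simp [List.isPrefixOf]

lemma rfind_append_ne {xs : List Char} {c : Char} (hc : c ≠ '0') :
    PySem.Chars.rfind (xs ++ [c]) ['0'] = PySem.Chars.rfind xs ['0'] := by
  have key : ∀ j, j ≤ xs.length →
      PySem.Chars.rfind.go (xs ++ [c]) ['0'] j = PySem.Chars.rfind.go xs ['0'] j := by
    intro j
    induction j with
    | zero =>
      intro _
      rw [PySem.Chars.rfind.go, PySem.Chars.rfind.go]
      simp only [isPrefixOf_zero_append hc]
    | succ j ih =>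
      intro hj
      rw [PySem.Chars.rfind.go, PySem.Chars.rfind.go]
      simp only [List.drop_append_of_le_length (show j + 1 ≤ xs.length by omega),
        isPrefixOf_zero_append hc, ih (by omega)]
  unfold PySem.Chars.rfind
  rw [List.length_append, List.length_cons, List.length_nil]
  rw [PySem.Chars.rfind.go]
  have hdrop : List.drop (xs.length + 0 + 1) (xs ++ [c]) = [] := by
    apply List.drop_eq_nil_of_le
    simp
  rw [hdrop]
  norm_num [List.isPrefixOf]
  rw [key xs.length (le_refl _)]

lemma go_of_prefix (s : List Char) (j : Nat)
    (h : List.isPrefixOf ['0'] (List.drop j s) = true) :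
    PySem.Chars.rfind.go s ['0'] j = (j : Int) := by
  cases j with
  | zero => rw [PySem.Chars.rfind.go]; rw [List.drop_zero] at h; rw [if_pos h]; norm_num
  | succ j => rw [PySem.Chars.rfind.go]; rw [if_pos h]

lemma rfind_append_zero (xs : List Char) :
    PySem.Chars.rfind (xs ++ ['0']) ['0'] = (xs.length : Int) := by
  unfold PySem.Chars.rfind
  rw [List.length_append, List.length_cons, List.length_nil]
  rw [PySem.Chars.rfind.go]
  have hdrop : List.drop (xs.length + 0 + 1) (xs ++ ['0']) = [] := by
    apply List.drop_eq_nil_of_le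
    simp
  rw [hdrop]
  norm_num [List.isPrefixOf]
  rw [go_of_prefix _ _ (by simp [List.isPrefixOf])]

lemma rfind_lt (s : List Char) : PySem.Chars.rfind s ['0'] < (s.length : Int) := by
  unfold PySem.Chars.rfind
  cases s with
  | nil =>
    rw [show ([] : List Char).length = 0 from rfl, PySem.Chars.rfind.go]
    simp [List.isPrefixOf]
  | cons a t =>
    rw [List.length_cons, PySem.Chars.rfind.go]
    split
    · rename_i hpre
      rw [List.drop_succ_cons, List.drop_length] at hpre
      simp [List.isPrefixOf] at hpre
    · have := go_le (a :: t) t.length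
      push_cast
      omega

lemma rfind_nonneg (l : List Char) : 0 ≤ PySem.Chars.rfind ('0' :: l) ['0'] := by
  apply go_nonneg
  simp [List.isPrefixOf]

def aMod (m : Nat) : List Char :=
  let B0 := '0' :: PySem.Int.toBinChars (m : Int)
  let idx := PySem.Chars.rfind B0 ['0']
  let B1 := PySem.List.pySetD B0 idx '1'
  if m % 2 = 1 then PySem.List.pySetD B1 (idx + 1) '0' else B1

lemma pySetD_append_left (P t : List Char) (i : Int) (v : Char)
    (h0 : 0 ≤ i) (h : i < (P.length : Int)) :
    PySem.List.pySetD (P ++ t) i v = PySem.List.pySetD P i v ++ t := by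
  rw [PySem.List.pySetD_of_nonneg _ _ h0, PySem.List.pySetD_of_nonneg _ _ h0]
  exact List.set_append_left _ _ (by omega)

lemma aStep_eq_aMod (x : Int) (hx : 0 ≤ x) : aStep x = parseBin2 (aMod x.toNat) := by
  obtain ⟨m, rfl⟩ : ∃ m : Nat, x = (m : Int) := ⟨x.toNat, (Int.toNat_of_nonneg hx).symm⟩
  simp only [aStep, aMod, Int.toNat_natCast]
  have hmod : PySem.Int.mod ((m : Nat) : Int) 2 = ((m % 2 : Nat) : Int) := by
    exact_mod_cast PySem.Int.mod_natCast m 2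
  rw [hmod]
  by_cases h : m % 2 = 1
  · rw [h]
    simp
  · have h0 : m % 2 = 0 := by omega
    rw [h0]
    simp

lemma parseBin2_append (xs : List Char) (c : Char) :
    parseBin2 (xs ++ [c]) = 2 * parseBin2 xs + (if c == '1' then 1 else 0) := by
  unfold parseBin2
  rw [List.foldl_append]
  simp

lemma parseBin2_cons_zero (l : List Char) :
    parseBin2 ('0' :: l) = l.foldl (fun a c => 2 * a + (if c == '1' then 1 else 0)) 0 := by
  unfold parseBin2
  simp

lemma foldl_binPos : ∀ c : Nat, 1 ≤ c →
    (binPos c).foldl (fun a ch => 2 * a + (if ch == '1' then 1 else 0)) 0 = (c : Int) := by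
  intro c
  induction c using Nat.strong_induction_on with
  | _ c ih =>
    intro hc
    by_cases h : c < 2
    · have : c = 1 := by omega
      subst this
      rw [binPos]
      norm_num
    · conv_lhs => rw [binPos, dif_neg h]
      rw [List.foldl_append]
      rw [ih (c / 2) (by omega) (by omega)]
      by_cases h0 : c % 2 = 0
      · rw [h0]
        have hd : (Nat.digitChar 0 == '1') = false := by decide
        simp only [List.foldl_cons, List.foldl_nil, hd, if_neg Bool.false_ne_true]
        omega
      · have h1 : c % 2 = 1 := by omega
        rw [h1]
        have hd : (Nat.digitChar 1 == '1') = true := by decide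
        simp only [List.foldl_cons, List.foldl_nil, if_pos hd]
        omega

lemma parseBin2_aMod : ∀ m : Nat, parseBin2 (aMod m) = (gnext m : Int) := by
  intro m
  induction m using Nat.strong_induction_on with
  | _ m ih =>
    by_cases hm0 : m = 0
    · subst hm0
      rw [gnext_even rfl]
      decide
    · by_cases hm1 : m = 1
      · subst hm1
        rw [gnext_odd rfl]
        rw [show (1:Nat)/2 = 0 from rfl, gnext_even rfl]
        decide
      · by_cases hpar : m % 2 = 0
        · -- even m ≥ 2
          obtain ⟨c, rfl⟩ : ∃ c, m = 2 * c := ⟨m / 2, by omega⟩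
          have hc : 1 ≤ c := by omega
          simp only [aMod]
          rw [toBinChars_eq (2 * c) (by omega), binPos_even c hc]
          rw [show '0' :: (binPos c ++ ['0']) = ('0' :: binPos c) ++ ['0'] from rfl]
          rw [rfind_append_zero]
          rw [if_neg (by omega)]
          simp only [PySem.List.pySetD_natCast]
          rw [List.set_append_right _ _ (le_refl _)]
          simp only [Nat.sub_self, List.set_cons_zero]
          rw [parseBin2_append, parseBin2_cons_zero, foldl_binPos c hc]
          rw [gnext_even hpar]
          have : (('1' : Char) == '1') = true := by decide
          rw [if_pos this]
          push_cast
          omega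
        · -- odd m ≥ 3
          obtain ⟨c, rfl⟩ : ∃ c, m = 2 * c + 1 := ⟨m / 2, by omega⟩
          have hc : 1 ≤ c := by omega
          simp only [aMod]
          rw [toBinChars_eq (2 * c + 1) (by omega), binPos_odd c hc]
          rw [show '0' :: (binPos c ++ ['1']) = ('0' :: binPos c) ++ ['1'] from rfl]
          rw [rfind_append_ne (by decide)]
          have h0i : 0 ≤ PySem.Chars.rfind ('0' :: binPos c) ['0'] := rfind_nonneg _
          have hlti : PySem.Chars.rfind ('0' :: binPos c) ['0'] < (('0' :: binPos c).length : Int) :=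
            rfind_lt _
          rw [pySetD_append_left _ _ _ _ h0i hlti]
          rw [if_pos (by omega)]
          by_cases hcp : c % 2 = 1
          · -- half is odd: both edits land inside '0'::binPos c, exactly as in aMod c
            obtain ⟨front, hfront⟩ := binPos_odd_last c hcp
            have hi2 : PySem.Chars.rfind ('0' :: binPos c) ['0']
                = PySem.Chars.rfind ('0' :: front) ['0'] := by
              rw [show ('0' :: binPos c) = ('0' :: front) ++ ['1'] by rw [hfront]; rfl]
              rw [rfind_append_ne (by decide)]
            have hi_lt : PySem.Chars.rfind ('0' :: binPos c) ['0'] + 1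
                < ((PySem.List.pySetD ('0' :: binPos c)
                    (PySem.Chars.rfind ('0' :: binPos c) ['0']) '1').length : Int) := by
              rw [PySem.List.length_pySetD]
              have h1 := rfind_lt ('0' :: front)
              have h2 : ('0' :: binPos c).length = ('0' :: front).length + 1 := by
                rw [hfront]; simp
              rw [hi2]
              omega
            rw [pySetD_append_left _ _ _ _ (by omega) hi_lt]
            rw [parseBin2_append]
            have hAm : PySem.List.pySetD
                (PySem.List.pySetD ('0' :: binPos c)
                  (PySem.Chars.rfind ('0' :: binPos c) ['0']) '1')
                (PySem.Chars.rfind ('0' :: binPos c) ['0'] + 1) '0' = aMod c := by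
              simp only [aMod]
              rw [toBinChars_eq c hc, if_pos hcp]
            rw [hAm, ih c (by omega)]
            conv_rhs => rw [gnext_odd (show (2 * c + 1) % 2 = 1 by omega),
              show (2 * c + 1) / 2 = c by omega]
            have : (('1' : Char) == '1') = true := by decide
            rw [if_pos this]
            push_cast
            omega
          · -- half is even: the second edit lands on the appended last bit
            have hcp0 : c % 2 = 0 := by omega
            obtain ⟨k, rfl⟩ : ∃ k, c = 2 * k := ⟨c / 2, by omega⟩
            have hk : 1 ≤ k := by omega
            have hP2 : ('0' :: binPos (2 * k)) = ('0' :: binPos k) ++ ['0'] := by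
              rw [binPos_even k hk]; rfl
            have hi2 : PySem.Chars.rfind ('0' :: binPos (2 * k)) ['0']
                = (((('0' : Char) :: binPos k).length : Nat) : Int) := by
              rw [hP2, rfind_append_zero]
            rw [hi2]
            rw [hP2]
            simp only [PySem.List.pySetD_natCast]
            rw [List.set_append_right _ _ (le_refl _)]
            simp only [Nat.sub_self, List.set_cons_zero]
            rw [show (((('0' : Char) :: binPos k).length : Int) + 1)
                = ((((('0' : Char) :: binPos k) ++ ['1']).length : Nat) : Int) by simp]
            simp only [PySem.List.pySetD_natCast]
            rw [List.set_append_right _ _ (le_refl _)]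
            simp only [Nat.sub_self, List.set_cons_zero]
            rw [parseBin2_append, parseBin2_append, parseBin2_cons_zero, foldl_binPos k hk]
            rw [gnext_odd (by omega)]
            rw [show (2 * (2 * k) + 1) / 2 = 2 * k by omega]
            rw [gnext_even (by omega)]
            have h1 : (('1' : Char) == '1') = true := by decide
            have h0 : (('0' : Char) == '1') = false := by decide
            rw [if_pos h1, if_neg (by simp [h0])]
            push_cast
            omega

-- ===== VERDICT (by name: the statement is the Claim_ definition above) =====
theorem solution_spec : Claim_equal_solution := by
  intro numbers _ hpre
  unfold Spec_solution
  unfold solution solution_alt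
  rw [PySem.List.foldl_append_singleton_eq_map]
  apply List.map_congr_left
  intro x hx
  have h0 : 0 ≤ x := hpre x hx
  have hm : ((x.toNat : Nat) : Int) = x := Int.toNat_of_nonneg h0
  calc aStep x = parseBin2 (aMod x.toNat) := aStep_eq_aMod x h0
    _ = (gnext x.toNat : Int) := parseBin2_aMod x.toNat
    _ = bitNext (x.toNat : Int) := (bitNext_eq_gnext x.toNat).symm
    _ = bitNext x := by rw [hm]
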